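-- pv_equiv track=rewrite | github.com/perfectblue/ctf-writeups | 2020/0CTF-quals/happy_tree/solve.py | unlsh
-- ===== SOURCE A (Python) =====
-- def unlsh(val, amt):
--     res = 0
--     for i in range(0, 32, amt):
--         known = val % 2**amt
--         res |= (known << i)
--         val >>= amt
--         val ^= known
--     return res & 0xffffffff
-- ===== SOURCE B (Python) =====
-- def unlsh(val, amt):
--     # Superimpose left-shifted copies of val (Neumann series of x ^ (x<<amt) over GF(2)),
--     # instead of extracting low blocks and folding them back with right shifts.
--     res = 0
--     s = 0
--     while s < 32:
--         res ^= val << s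
--         s += amt
--     return res & 0xffffffff
-- ===== Notes on version B (the rewrite author's own statement) =====
-- stated objective: simpler
-- what changed: B replaces A's block-extraction loop (take low amt bits, OR them into place, right-shift and xor back) by the closed Neumann-series inverse: xor together val shifted left by every multiple of amt below 32 and mask to 32 bits; val is never mutated and no modulus is taken.
-- outside the precondition, e.g. on unlsh(5, -3): A returns 0, B raises ValueError; on unlsh(5, 0): A raises ValueError, B does not finish within the time limit
import Mathlib
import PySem

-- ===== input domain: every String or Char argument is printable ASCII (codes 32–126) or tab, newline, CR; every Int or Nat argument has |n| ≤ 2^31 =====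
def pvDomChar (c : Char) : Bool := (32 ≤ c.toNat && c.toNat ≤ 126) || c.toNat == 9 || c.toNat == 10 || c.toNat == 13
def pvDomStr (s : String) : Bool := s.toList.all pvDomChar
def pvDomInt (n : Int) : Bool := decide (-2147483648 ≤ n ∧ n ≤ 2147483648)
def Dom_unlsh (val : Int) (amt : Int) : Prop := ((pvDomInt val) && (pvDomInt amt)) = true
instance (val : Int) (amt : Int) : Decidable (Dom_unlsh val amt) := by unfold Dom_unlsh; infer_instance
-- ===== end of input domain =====

-- B replaces A's block-extraction loop by superimposing left-shifted copies of val; same 32-bit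
-- result (proved below); objective: simpler — val is never mutated, no modulus, no fold-back.

-- ===== PORT A =====
-- for i in range(0, 32, amt): known = val % 2**amt; res |= known << i; val >>= amt; val ^= known
-- (i and amt are ≥ 0 whenever the loop body runs under Pre_, so `.toNat` on them is exact)
def unlsh (val : Int) (amt : Int) : Int :=
  let st := (PySem.List.pyRange 0 32 amt).foldl
    (fun (st : Int × Int) (i : Int) =>
      (PySem.Int.bor st.1 ((PySem.Int.mod st.2 (2 ^ amt.toNat)) <<< i.toNat),
       PySem.Int.bxor (st.2 >>> amt.toNat) (PySem.Int.mod st.2 (2 ^ amt.toNat))))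
    (0, val)
  PySem.Int.band st.1 0xffffffff

-- ===== PORT B =====
-- while s < 32: res ^= val << s; s += amt   (Source B).  The fuel argument (32) is only a totality
-- guard: under Pre_ (amt ≥ 1) the loop runs at most 32 iterations, so it never runs out.
def unlshAltGo (val : Int) (amt : Nat) : Nat → Nat → Int → Int
  | 0, _, res => res
  | fuel+1, s, res =>
    if s < 32 then unlshAltGo val amt fuel (s + amt) (PySem.Int.bxor res (val <<< s)) else res

def unlsh_alt (val : Int) (amt : Int) : Int :=
  PySem.Int.band (unlshAltGo val amt.toNat 32 0 0) 0xffffffff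

-- ===== PRECONDITION & SPEC =====
-- Pre_ excludes amt ≤ 0: Python A raises ValueError at range() for amt = 0, and for amt < 0 it
-- returns 0 accidentally (the range is empty, leaving res = 0) while B raises ValueError on the
-- negative shift count (and for amt = 0 B's while-loop never terminates).
def Pre_unlsh (val : Int) (amt : Int) : Prop := 1 ≤ amt
instance (val : Int) (amt : Int) : Decidable (Pre_unlsh val amt) := by unfold Pre_unlsh; infer_instance

def pvWitness_unlsh : Int × Int := (1234567, 3)

def Spec_unlsh (val : Int) (amt : Int) (out : Int) : Prop := out = unlsh_alt val amt
instance (val : Int) (amt : Int) (out : Int) : Decidable (Spec_unlsh val amt out) := by unfold Spec_unlsh; infer_instance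

-- ===== CLAIM (what is proved, stated in full; the proofs are below) =====
def Claim_equal_unlsh : Prop := ∀ (val : Int) (amt : Int), Dom_unlsh val amt → Pre_unlsh val amt → Spec_unlsh val amt (unlsh val amt)

-- ===== LEMMAS AND PROOFS =====

-- ---- generic Int.testBit toolkit ----

theorem pvInt_ext {x y : Int} (h : ∀ i, x.testBit i = y.testBit i) : x = y := by
  cases x with
  | ofNat m =>
    cases y with
    | ofNat n =>
      congr 1
      exact Nat.eq_of_testBit_eq (fun i => h i)
    | negSucc n =>
      exfalso
      have hm : m.testBit (m + n) = false := Nat.testBit_lt_two_pow (lt_of_lt_of_le Nat.lt_two_pow_self (Nat.pow_le_pow_right (by omega) (by omega)))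
      have hn : n.testBit (m + n) = false := Nat.testBit_lt_two_pow (lt_of_lt_of_le Nat.lt_two_pow_self (Nat.pow_le_pow_right (by omega) (by omega)))
      have := h (m + n)
      simp [Int.testBit, hm, hn] at this
  | negSucc m =>
    cases y with
    | ofNat n =>
      exfalso
      have hm : m.testBit (m + n) = false := Nat.testBit_lt_two_pow (lt_of_lt_of_le Nat.lt_two_pow_self (Nat.pow_le_pow_right (by omega) (by omega)))
      have hn : n.testBit (m + n) = false := Nat.testBit_lt_two_pow (lt_of_lt_of_le Nat.lt_two_pow_self (Nat.pow_le_pow_right (by omega) (by omega)))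
      have := h (m + n)
      simp [Int.testBit, hm, hn] at this
    | negSucc n =>
      congr 1
      refine Nat.eq_of_testBit_eq (fun i => ?_)
      have := h i
      simp [Int.testBit] at this
      exact this

theorem pvNegSucc_eq' (m : Nat) : -(m : Int) - 1 = Int.negSucc m := by
  rw [Int.negSucc_eq]; ring

theorem pvTestBit_bxor (a b : Int) (i : Nat) :
    (PySem.Int.bxor a b).testBit i = xor (a.testBit i) (b.testBit i) := by
  rw [PySem.Int.bxor.eq_1]
  cases a with
  | ofNat m =>
    cases b with
    | ofNat n => simp [Int.testBit, Nat.testBit_xor]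
    | negSucc n =>
      have h1 : (0 : Int) ≤ Int.ofNat m := Int.natCast_nonneg m
      have h2 : ¬ (0 : Int) ≤ Int.negSucc n := by omega
      have h3 : (-(Int.negSucc n) - 1).toNat = n := by rw [Int.negSucc_eq]; omega
      simp only [h1, h2, if_true, if_false, h3]
      rw [show ((Int.ofNat m).toNat) = m from rfl, pvNegSucc_eq' (m ^^^ n)]
      simp [Int.testBit, Nat.testBit_xor]
  | negSucc m =>
    have h2 : ¬ (0 : Int) ≤ Int.negSucc m := by omega
    have h3 : (-(Int.negSucc m) - 1).toNat = m := by rw [Int.negSucc_eq]; omega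
    cases b with
    | ofNat n =>
      have h1 : (0 : Int) ≤ Int.ofNat n := Int.natCast_nonneg n
      simp only [h1, h2, if_true, if_false, h3]
      rw [show ((Int.ofNat n).toNat) = n from rfl, pvNegSucc_eq' (m ^^^ n)]
      simp [Int.testBit, Nat.testBit_xor]
    | negSucc n =>
      have h1 : ¬ (0 : Int) ≤ Int.negSucc n := by omega
      have h4 : (-(Int.negSucc n) - 1).toNat = n := by rw [Int.negSucc_eq]; omega
      simp only [h1, h2, if_false, h3, h4]
      simp [Int.testBit, Nat.testBit_xor]

theorem pvTestBit_bor_nonneg {a b : Int} (ha : 0 ≤ a) (hb : 0 ≤ b) (i : Nat) :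
    (PySem.Int.bor a b).testBit i = (a.testBit i || b.testBit i) := by
  rw [PySem.Int.bor_of_nonneg ha hb]
  obtain ⟨m, rfl⟩ := Int.eq_ofNat_of_zero_le ha
  obtain ⟨n, rfl⟩ := Int.eq_ofNat_of_zero_le hb
  simp [Int.testBit, Nat.testBit_or]

theorem pvNatShiftOnes (m s i : Nat) :
    ((m + 1) <<< s - 1).testBit i = (decide (i < s) || m.testBit (i - s)) := by
  induction s generalizing i with
  | zero => simp
  | succ s ih =>
    have h1 : 1 ≤ (m + 1) <<< s := by
      rw [Nat.shiftLeft_eq]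
      exact Nat.one_le_iff_ne_zero.mpr (by positivity)
    have h : (m + 1) <<< (s + 1) - 1 = 2 * ((m + 1) <<< s - 1) + 1 := by
      rw [Nat.shiftLeft_succ]; omega
    rw [h]
    cases i with
    | zero => simp
    | succ i =>
      rw [show 2 * ((m + 1) <<< s - 1) + 1 = Nat.bit true ((m + 1) <<< s - 1) from by simp [Nat.bit]]
      rw [Nat.testBit_bit_succ, ih]
      simp only [Nat.succ_sub_succ]
      congr 1
      simp

theorem pvTestBit_shiftLeft (x : Int) (n i : Nat) :
    (x <<< n).testBit i = (decide (n ≤ i) && x.testBit (i - n)) := by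
  cases x with
  | ofNat m =>
    rw [show (Int.ofNat m) <<< n = Int.ofNat (m <<< n) from rfl]
    simp [Int.testBit, Nat.testBit_shiftLeft]
  | negSucc m =>
    rw [show (Int.negSucc m) <<< n = Int.negSucc ((m+1) <<< n - 1) from rfl]
    simp only [Int.testBit, pvNatShiftOnes]
    cases Nat.lt_or_ge i n with
    | inl h => simp [h, Nat.not_le.mpr h]
    | inr h => simp [Nat.not_lt.mpr h, h]

theorem pvTestBit_shiftRight (x : Int) (n i : Nat) :
    (x >>> n).testBit i = x.testBit (i + n) := by
  cases x with
  | ofNat m =>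
    rw [show (Int.ofNat m) >>> n = Int.ofNat (m >>> n) from rfl]
    simp [Int.testBit, Nat.testBit_shiftRight, Nat.add_comm]
  | negSucc m =>
    rw [show (Int.negSucc m) >>> n = Int.negSucc (m >>> n) from rfl]
    simp [Int.testBit, Nat.testBit_shiftRight, Nat.add_comm]

theorem pvNat_sub_complement_testBit (n : Nat) : ∀ (k i : Nat), k < 2 ^ n →
    (2 ^ n - 1 - k).testBit i = (decide (i < n) && !(k.testBit i)) := by
  induction n with
  | zero => intro k i hk; interval_cases k; simp
  | succ n ih =>
    intro k i hk
    have h : 2 ^ (n + 1) - 1 - k = 2 * (2 ^ n - 1 - k / 2) + (1 - k % 2) := by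
      have h2 : k / 2 < 2 ^ n := by omega
      have h3 : k % 2 < 2 := Nat.mod_lt _ (by omega)
      have := Nat.div_add_mod k 2
      have hp : 2 ^ (n+1) = 2 * 2 ^ n := by ring
      omega
    rw [h]
    cases i with
    | zero =>
      simp only [Nat.testBit_zero]
      have h3 : k % 2 < 2 := Nat.mod_lt _ (by omega)
      rcases (by omega : k % 2 = 0 ∨ k % 2 = 1) with h4 | h4 <;> simp [h4]
    | succ i =>
      have hb : 2 * (2 ^ n - 1 - k / 2) + (1 - k % 2) = Nat.bit (k % 2 = 0) (2 ^ n - 1 - k / 2) := by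
        simp only [Nat.bit]
        by_cases h4 : k % 2 = 0 <;> simp [h4] <;> omega
      rw [hb, Nat.testBit_bit_succ, ih (k/2) i (by omega), Nat.testBit_succ]
      simp only [Nat.lt_succ_iff] at *
      by_cases h5 : i < n <;> simp [h5]

theorem pvTestBit_emod_two_pow (x : Int) (n i : Nat) :
    (x % ((2 ^ n : Nat) : Int)).testBit i = (decide (i < n) && x.testBit i) := by
  cases x with
  | ofNat m =>
    rw [show (Int.ofNat m) % ((2 ^ n : Nat) : Int) = Int.ofNat (m % 2 ^ n) from by
      rw [show Int.ofNat m = ((m:Nat):Int) from rfl, show Int.ofNat (m % 2^n) = ((m % 2^n : Nat):Int) from rfl]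
      exact (Int.natCast_emod m (2^n)).symm]
    simp [Int.testBit, Nat.testBit_mod_two_pow]
  | negSucc m =>
    have hbound : m % 2 ^ n < 2 ^ n := Nat.mod_lt _ (by positivity)
    have h : (Int.negSucc m) % ((2 ^ n : Nat) : Int) = Int.ofNat (2 ^ n - 1 - m % 2 ^ n) := by
      have h1 : Int.negSucc m = -(m : Int) - 1 := by rw [Int.negSucc_eq]; ring
      rw [h1]
      have h2 : ((2 ^ n - 1 - m % 2 ^ n : Nat) : Int) = ((2:Int) ^ n) - 1 - ((m : Int) % ((2:Int) ^ n)) := by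
        push_cast [Nat.cast_sub (by omega : m % 2 ^ n ≤ 2 ^ n - 1), Nat.cast_sub (by omega : 1 ≤ 2 ^ n)]
        ring
      rw [show (Int.ofNat (2 ^ n - 1 - m % 2 ^ n)) = ((2 ^ n - 1 - m % 2 ^ n : Nat) : Int) from rfl, h2]
      have h3 : (m : Int) % ((2:Int) ^ n) = ((m % 2 ^ n : Nat) : Int) := by push_cast; ring
      have h5 : ((-(m:Int) - 1) - ((2:Int)^n - 1 - (m:Int) % ((2:Int)^n))) % ((2:Int)^n) = 0 := by
        have h6 : (m : Int) % ((2:Int)^n) = (m:Int) - ((2:Int)^n) * ((m:Int) / ((2:Int)^n)) := by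
          rw [Int.emod_def]
        rw [show ((-(m:Int) - 1) - ((2:Int)^n - 1 - (m:Int) % ((2:Int)^n))) = ((2:Int)^n) * (-1 - ((m:Int) / ((2:Int)^n))) from by rw [h6]; ring]
        exact Int.mul_emod_right _ _
      have h7 : (0:Int) ≤ (2:Int)^n - 1 - (m:Int) % ((2:Int)^n) := by
        rw [h3]; push_cast; omega
      have h8 : (2:Int)^n - 1 - (m:Int) % ((2:Int)^n) < (2:Int)^n := by
        have : (0:Int) ≤ (m : Int) % ((2:Int)^n) := Int.emod_nonneg _ (by positivity)
        omega
      have h9 : (-(m:Int) - 1) % ((2:Int)^n) = (2:Int)^n - 1 - (m:Int) % ((2:Int)^n) := by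
        calc (-(m:Int) - 1) % ((2:Int)^n)
            = ((2:Int)^n - 1 - (m:Int) % ((2:Int)^n)) % ((2:Int)^n) :=
              (Int.emod_eq_emod_iff_emod_sub_eq_zero.mpr h5)
          _ = (2:Int)^n - 1 - (m:Int) % ((2:Int)^n) := Int.emod_eq_of_lt h7 h8
      push_cast
      push_cast at h9
      omega
    rw [h]
    simp only [Int.testBit]
    rw [pvNat_sub_complement_testBit n (m % 2 ^ n) i hbound]
    simp only [Nat.testBit_mod_two_pow]
    by_cases hin : i < n <;> simp [hin]

theorem pvBand_mask (x : Int) : PySem.Int.band x 0xffffffff = x % 4294967296 := by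
  rw [PySem.Int.band.eq_1]
  cases x with
  | ofNat m =>
    have h1 : (0 : Int) ≤ Int.ofNat m := Int.natCast_nonneg m
    simp only [h1, if_true, show ((0:Int) ≤ 0xffffffff) from by norm_num, show ((0xffffffff : Int)).toNat = 4294967295 from rfl]
    rw [show (Int.ofNat m).toNat = m from rfl]
    rw [show (4294967295 : Nat) = 2 ^ 32 - 1 from rfl, Nat.and_two_pow_sub_one_eq_mod]
    rw [show Int.ofNat m = ((m:Nat):Int) from rfl]
    rw [show ((4294967296:Int)) = ((2^32 : Nat) : Int) from rfl]
    exact_mod_cast (Int.natCast_emod m (2^32)).symm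
  | negSucc m =>
    have h1 : ¬ (0 : Int) ≤ Int.negSucc m := by
      rw [Int.negSucc_eq]; omega
    simp only [h1, if_false, show ((0:Int) ≤ 0xffffffff) from by norm_num, if_true]
    have h2 : (-(Int.negSucc m) - 1).toNat = m := by rw [Int.negSucc_eq]; omega
    rw [h2, show ((0xffffffff : Int)).toNat = 4294967295 from rfl]
    rw [show (4294967295 : Nat) = 2 ^ 32 - 1 from rfl]
    rw [Nat.and_comm, Nat.and_two_pow_sub_one_eq_mod]
    have hb : m % 2 ^ 32 < 2 ^ 32 := Nat.mod_lt _ (by positivity)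
    have h3 : Int.negSucc m = -(m:Int) - 1 := by rw [Int.negSucc_eq]; ring
    have h4 : (m:Int) % ((2:Int)^32) = ((m % 2^32 : Nat) : Int) := by push_cast; ring
    have h5 : ((-(m:Int) - 1) - ((2:Int)^32 - 1 - (m:Int) % ((2:Int)^32))) % ((2:Int)^32) = 0 := by
      have h6 : (m : Int) % ((2:Int)^32) = (m:Int) - ((2:Int)^32) * ((m:Int) / ((2:Int)^32)) := by
        rw [Int.emod_def]
      rw [show ((-(m:Int) - 1) - ((2:Int)^32 - 1 - (m:Int) % ((2:Int)^32))) = ((2:Int)^32) * (-1 - ((m:Int) / ((2:Int)^32))) from by rw [h6]; ring]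
      exact Int.mul_emod_right _ _
    have h7 : (0:Int) ≤ (2:Int)^32 - 1 - (m:Int) % ((2:Int)^32) := by rw [h4]; push_cast; omega
    have h8 : (2:Int)^32 - 1 - (m:Int) % ((2:Int)^32) < (2:Int)^32 := by
      have : (0:Int) ≤ (m:Int) % ((2:Int)^32) := Int.emod_nonneg _ (by positivity)
      omega
    have h9 : (-(m:Int) - 1) % ((2:Int)^32) = (2:Int)^32 - 1 - (m:Int) % ((2:Int)^32) :=
      (Int.emod_eq_emod_iff_emod_sub_eq_zero.mpr h5).trans (Int.emod_eq_of_lt h7 h8)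
    rw [h3, show ((4294967296:Int)) = ((2:Int)^32) from by norm_num, h9, h4]
    push_cast [Nat.cast_sub (by omega : m % 4294967296 ≤ 4294967295)]
    omega

theorem pvEmod_ext {x y : Int} (h : ∀ i < 32, x.testBit i = y.testBit i) :
    x % 4294967296 = y % 4294967296 := by
  have hN : ((4294967296:Int)) = ((2^32 : Nat) : Int) := rfl
  have hx : (0:Int) ≤ x % 4294967296 := Int.emod_nonneg _ (by norm_num)
  have hy : (0:Int) ≤ y % 4294967296 := Int.emod_nonneg _ (by norm_num)
  rw [← Int.toNat_of_nonneg hx, ← Int.toNat_of_nonneg hy]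
  congr 1
  refine Nat.eq_of_testBit_eq (fun i => ?_)
  have bx : (x % 4294967296).toNat.testBit i = (x % 4294967296).testBit i := by
    rw [← Int.toNat_of_nonneg hx]; rfl
  have by' : (y % 4294967296).toNat.testBit i = (y % 4294967296).testBit i := by
    rw [← Int.toNat_of_nonneg hy]; rfl
  rw [bx, by', hN, pvTestBit_emod_two_pow, pvTestBit_emod_two_pow]
  by_cases hi : i < 32
  · simp [hi, h i hi]
  · simp [hi]

-- ---- loop-shape lemmas ----

def pvAGo (a : Nat) : Nat → Nat → Int → Int → Int
  | 0, _, res, _ => res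
  | fuel+1, s, res, v =>
    if s < 32 then
      pvAGo a fuel (s + a) (PySem.Int.bor res ((PySem.Int.mod v (2 ^ a)) <<< s))
        (PySem.Int.bxor (v >>> a) (PySem.Int.mod v (2 ^ a)))
    else res

theorem pvPyRange_empty {a b step : Int} (hs : 0 < step) (hab : b ≤ a) :
    PySem.List.pyRange a b step = [] := by
  rw [PySem.List.pyRange_of_pos a b hs, if_neg (by omega)]
  rfl

theorem pvPyRange_cons_pos {a b step : Int} (hs : 0 < step) (hab : a < b) :
    PySem.List.pyRange a b step = a :: PySem.List.pyRange (a + step) b step := by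
  rw [PySem.List.pyRange_of_pos a b hs, PySem.List.pyRange_of_pos (a + step) b hs]
  have hc : b - a - 1 ≥ 0 := by omega
  have hN : (b - a + step - 1) / step = (b - a - 1) / step + 1 := by
    rw [show b - a + step - 1 = (b - a - 1) + 1 * step from by ring]
    rw [Int.add_mul_ediv_right _ _ (by omega : step ≠ 0)]
  have hq : (b - a - 1) / step ≥ 0 := Int.ediv_nonneg hc (by omega)
  rw [if_pos hab]
  rw [hN]
  have ht : ((b - a - 1) / step + 1).toNat = ((b - a - 1) / step).toNat + 1 := by omega
  rw [ht, List.range_succ_eq_map, List.map_cons]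
  simp only [Nat.cast_zero, mul_zero, add_zero]
  congr 1
  · by_cases hab2 : a + step < b
    · rw [if_pos hab2]
      have hN2 : (b - (a + step) + step - 1) / step = (b - a - 1) / step := by
        rw [show b - (a + step) + step - 1 = b - a - 1 from by ring]
      rw [hN2, List.map_map]
      refine List.map_congr_left (fun k _ => ?_)
      simp only [Function.comp_apply]
      push_cast
      ring
    · rw [if_neg hab2]
      have : (b - a - 1) / step = 0 := by
        apply Int.ediv_eq_zero_of_lt hc
        omega
      simp [this]

theorem pvFoldl_eq_aGo (amt : Int) (h1 : 1 ≤ amt) :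
    ∀ (fuel s : Nat) (res v : Int), 32 ≤ s + fuel →
      ((PySem.List.pyRange (s : Int) 32 amt).foldl
        (fun (st : Int × Int) (i : Int) =>
          (PySem.Int.bor st.1 ((PySem.Int.mod st.2 (2 ^ amt.toNat)) <<< i.toNat),
           PySem.Int.bxor (st.2 >>> amt.toNat) (PySem.Int.mod st.2 (2 ^ amt.toNat))))
        (res, v)).1 = pvAGo amt.toNat fuel s res v := by
  intro fuel
  induction fuel with
  | zero =>
    intro s res v hsf
    rw [pvPyRange_empty (by omega) (by exact_mod_cast by omega : (32:Int) ≤ (s:Int))]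
    simp [pvAGo]
  | succ fuel ih =>
    intro s res v hsf
    by_cases hs32 : s < 32
    · rw [pvPyRange_cons_pos (by omega) (by exact_mod_cast hs32)]
      rw [List.foldl_cons]
      have hcast : ((s : Int) + amt) = ((s + amt.toNat : Nat) : Int) := by
        push_cast
        omega
      simp only [hcast]
      rw [ih (s + amt.toNat) _ _ (by omega)]
      simp only [pvAGo, if_pos hs32, Int.toNat_natCast]
    · rw [pvPyRange_empty (by omega) (by exact_mod_cast by omega : (32:Int) ≤ (s:Int))]
      simp [pvAGo, hs32]

theorem pvKnown_nonneg (v : Int) (a : Nat) : 0 ≤ PySem.Int.mod v (2 ^ a) :=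
  PySem.Int.mod_nonneg v (by positivity)

theorem pvKshift_nonneg (v : Int) (a s : Nat) : 0 ≤ (PySem.Int.mod v (2 ^ a)) <<< s := by
  rw [Int.shiftLeft_eq]
  exact mul_nonneg (pvKnown_nonneg v a) (by positivity)

theorem pvBor_nonneg {a b : Int} (ha : 0 ≤ a) (hb : 0 ≤ b) : 0 ≤ PySem.Int.bor a b := by
  rw [PySem.Int.bor_of_nonneg ha hb]
  exact Int.natCast_nonneg _

theorem pvBor_zero_left (x : Int) : PySem.Int.bor 0 x = x := by
  rw [PySem.Int.bor_comm]; exact PySem.Int.bor_zero x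

theorem pvBxor_zero_left (x : Int) : PySem.Int.bxor 0 x = x := by
  rw [PySem.Int.bxor_comm]; exact PySem.Int.bxor_zero x

theorem pvBor_assoc_nonneg {x y z : Int} (hx : 0 ≤ x) (hy : 0 ≤ y) (hz : 0 ≤ z) :
    PySem.Int.bor (PySem.Int.bor x y) z = PySem.Int.bor x (PySem.Int.bor y z) := by
  refine pvInt_ext (fun i => ?_)
  rw [pvTestBit_bor_nonneg (pvBor_nonneg hx hy) hz, pvTestBit_bor_nonneg hx hy,
      pvTestBit_bor_nonneg hx (pvBor_nonneg hy hz), pvTestBit_bor_nonneg hy hz,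
      Bool.or_assoc]

theorem pvBxor_assoc (x y z : Int) :
    PySem.Int.bxor (PySem.Int.bxor x y) z = PySem.Int.bxor x (PySem.Int.bxor y z) := by
  refine pvInt_ext (fun i => ?_)
  rw [pvTestBit_bxor, pvTestBit_bxor, pvTestBit_bxor, pvTestBit_bxor, Bool.xor_assoc]

theorem pvAGo_nonneg (a : Nat) : ∀ (fuel s : Nat) (res v : Int), 0 ≤ res →
    0 ≤ pvAGo a fuel s res v := by
  intro fuel
  induction fuel with
  | zero => intro s res v h; simpa [pvAGo] using h
  | succ fuel ih =>
    intro s res v h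
    by_cases hs : s < 32
    · simp only [pvAGo, if_pos hs]
      exact ih _ _ _ (pvBor_nonneg h (pvKshift_nonneg v a s))
    · simpa [pvAGo, hs] using h

theorem pvAGo_extract (a : Nat) : ∀ (fuel s : Nat) (res v : Int), 0 ≤ res →
    pvAGo a fuel s res v = PySem.Int.bor res (pvAGo a fuel s 0 v) := by
  intro fuel
  induction fuel with
  | zero => intro s res v h; simp [pvAGo]
  | succ fuel ih =>
    intro s res v h
    by_cases hs : s < 32
    · simp only [pvAGo, if_pos hs]
      rw [ih _ _ _ (pvBor_nonneg h (pvKshift_nonneg v a s)),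
          ih _ (PySem.Int.bor 0 _) _ (pvBor_nonneg le_rfl (pvKshift_nonneg v a s)),
          pvBor_zero_left,
          pvBor_assoc_nonneg h (pvKshift_nonneg v a s) (pvAGo_nonneg a fuel _ 0 _ le_rfl)]
    · simp [pvAGo, hs]

theorem pvBGo_extract (val : Int) (a : Nat) : ∀ (fuel s : Nat) (res : Int),
    unlshAltGo val a fuel s res = PySem.Int.bxor res (unlshAltGo val a fuel s 0) := by
  intro fuel
  induction fuel with
  | zero => intro s res; simp [unlshAltGo]
  | succ fuel ih =>
    intro s res
    by_cases hs : s < 32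
    · simp only [unlshAltGo, if_pos hs]
      rw [ih _ (PySem.Int.bxor res _), ih _ (PySem.Int.bxor 0 _), pvBxor_zero_left, pvBxor_assoc]
    · simp [unlshAltGo, hs]

-- ---- the common per-bit specification ----

def pvSpecF (v : Int) (a : Nat) : Nat → Nat → Nat → Bool
  | 0, _, _ => false
  | fuel+1, s, i => if s ≤ i then xor (v.testBit (i - s)) (pvSpecF v a fuel (s + a) i) else false

theorem pvSpecF_lt (v : Int) (a : Nat) : ∀ (fuel s i : Nat), i < s → pvSpecF v a fuel s i = false := by
  intro fuel s i h
  cases fuel with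
  | zero => rfl
  | succ fuel => simp [pvSpecF, Nat.not_le.mpr h]

theorem pvTestBit_zero_int (i : Nat) : (0 : Int).testBit i = false := by
  simp [Int.testBit]

theorem pvBChar (val : Int) (a : Nat) : ∀ (fuel s i : Nat), i < 32 →
    (unlshAltGo val a fuel s 0).testBit i = pvSpecF val a fuel s i := by
  intro fuel
  induction fuel with
  | zero => intro s i hi; simp [unlshAltGo, pvSpecF, pvTestBit_zero_int]
  | succ fuel ih =>
    intro s i hi
    by_cases hs : s < 32
    · simp only [unlshAltGo, if_pos hs]
      rw [pvBGo_extract, pvBxor_zero_left, pvTestBit_bxor, pvTestBit_shiftLeft, ih _ _ hi]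
      simp only [pvSpecF]
      by_cases hsi : s ≤ i
      · simp [hsi]
      · simp only [if_neg hsi]
        rw [pvSpecF_lt val a fuel (s + a) i (by omega)]
        simp [hsi]
    · simp only [unlshAltGo, if_neg hs]
      rw [pvTestBit_zero_int, pvSpecF_lt val a (fuel+1) s i (by omega)]

theorem pvKnownBit (v : Int) (a : Nat) (j : Nat) :
    (PySem.Int.mod v (2 ^ a)).testBit j = (decide (j < a) && v.testBit j) := by
  rw [PySem.Int.mod_eq_emod_of_pos (b := (2:Int) ^ a) (by positivity)]
  rw [show ((2:Int) ^ a) = ((2 ^ a : Nat) : Int) from by push_cast; ring]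
  exact pvTestBit_emod_two_pow v a j

theorem pvVPrimeBit (v : Int) (a : Nat) (j : Nat) :
    (PySem.Int.bxor (v >>> a) (PySem.Int.mod v (2 ^ a))).testBit j
      = xor (v.testBit (j + a)) (decide (j < a) && v.testBit j) := by
  rw [pvTestBit_bxor, pvTestBit_shiftRight]
  congr 1
  exact pvKnownBit v a j

theorem pvKey (v : Int) (a : Nat) (ha : 1 ≤ a) :
    ∀ (fuel s i : Nat), s + a ≤ i → i ≤ s + fuel →
      pvSpecF (PySem.Int.bxor (v >>> a) (PySem.Int.mod v (2 ^ a))) a fuel (s + a) i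
        = pvSpecF v a (fuel + 1) s i := by
  intro fuel
  induction fuel with
  | zero => intro s i h1 h2; omega
  | succ fuel ih =>
    intro s i h1 h2
    have hL : pvSpecF (PySem.Int.bxor (v >>> a) (PySem.Int.mod v (2 ^ a))) a (fuel+1) (s + a) i
        = xor ((PySem.Int.bxor (v >>> a) (PySem.Int.mod v (2 ^ a))).testBit (i - (s+a)))
              (pvSpecF (PySem.Int.bxor (v >>> a) (PySem.Int.mod v (2 ^ a))) a fuel (s + a + a) i) := by
      simp [pvSpecF, h1]
    have hR : pvSpecF v a (fuel + 2) s i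
        = xor (v.testBit (i - s)) (pvSpecF v a (fuel+1) (s + a) i) := by
      simp [pvSpecF, (by omega : s ≤ i)]
    rw [hL, hR, pvVPrimeBit]
    have he : i - (s + a) + a = i - s := by omega
    rw [he]
    by_cases hc : s + a + a ≤ i
    · -- far case: the correction bit is off, the inner induction hypothesis applies
      rw [ih (s + a) i (by omega) (by omega)]
      have : ¬ (i - (s + a) < a) := by omega
      simp [this]
    · -- boundary case: both tails are empty and the correction bit closes the telescope
      rw [pvSpecF_lt _ a fuel (s + a + a) i (by omega)]
      have hR2 : pvSpecF v a (fuel+1) (s + a) i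
          = xor (v.testBit (i - (s+a))) (pvSpecF v a fuel (s + a + a) i) := by
        simp [pvSpecF, (by omega : s + a ≤ i)]
      rw [hR2, pvSpecF_lt v a fuel (s + a + a) i (by omega)]
      have : (i - (s + a) < a) := by omega
      simp [this]

theorem pvAChar (a : Nat) (ha : 1 ≤ a) :
    ∀ (fuel s : Nat) (v : Int) (i : Nat), i < 32 → 32 ≤ s + fuel →
      (pvAGo a fuel s 0 v).testBit i = pvSpecF v a fuel s i := by
  intro fuel
  induction fuel with
  | zero => intro s v i hi hsf; simp [pvAGo, pvSpecF, pvTestBit_zero_int]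
  | succ fuel ih =>
    intro s v i hi hsf
    by_cases hs : s < 32
    · simp only [pvAGo, if_pos hs]
      rw [pvAGo_extract a fuel (s+a) _ _ (by
            have := pvKshift_nonneg v a s
            simpa [pvBor_zero_left] using this)]
      rw [pvBor_zero_left]
      rw [pvTestBit_bor_nonneg (pvKshift_nonneg v a s) (pvAGo_nonneg a fuel _ 0 _ le_rfl)]
      rw [pvTestBit_shiftLeft, pvKnownBit, ih (s+a) _ i hi (by omega)]
      by_cases h1 : s ≤ i
      · by_cases h2 : s + a ≤ i
        · -- high case: the fresh block's bit is off, the key telescoping lemma gives the tail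
          rw [pvKey v a ha fuel s i h2 (by omega)]
          have : ¬ (i - s < a) := by omega
          simp only [pvSpecF]
          simp [this, h1]
        · -- middle case: only the fresh block contributes
          rw [pvSpecF_lt _ a fuel (s+a) i (by omega)]
          have h3 : i - s < a := by omega
          simp only [pvSpecF]
          rw [pvSpecF_lt v a fuel (s+a) i (by omega)]
          simp [h1, h3]
      · -- low case: everything below s is zero
        rw [pvSpecF_lt _ a fuel (s+a) i (by omega), pvSpecF_lt v a (fuel+1) s i (by omega)]
        simp [h1]
    · simp only [pvAGo, if_neg hs]
      rw [pvTestBit_zero_int, pvSpecF_lt v a (fuel+1) s i (by omega)]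

-- ===== VERDICT (by name: the statement is the Claim_ definition above) =====
theorem unlsh_spec : Claim_equal_unlsh := by
  intro val amt _ hpre
  have hp : 1 ≤ amt := hpre
  unfold Spec_unlsh unlsh unlsh_alt
  simp only
  have h := pvFoldl_eq_aGo amt hp 32 0 0 val (by omega)
  simp only [Nat.cast_zero] at h
  rw [h]
  rw [pvBand_mask, pvBand_mask]
  refine pvEmod_ext (fun i hi => ?_)
  rw [pvAChar amt.toNat (by omega) 32 0 val i hi (by omega),
      pvBChar val amt.toNat 32 0 i hi]
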